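-- pv_equiv track=rewrite | github.com/yusakh/pe-architect-course | workshop/teams-management/teams-operator/teams_operator.py | sanitize_namespace_name
-- ===== SOURCE A (Python) =====
-- def sanitize_namespace_name(team_name: str) -> str:
--     """Convert team name to valid Kubernetes namespace name"""
--     # Lowercase, replace spaces/special chars with hyphens, remove consecutive hyphens
--     namespace = team_name.lower()
--     namespace = ''.join(c if c.isalnum() else '-' for c in namespace)
--     namespace = '-'.join(filter(None, namespace.split('-')))  # Remove consecutive hyphens
--
--     # Ensure it starts and ends with alphanumeric
--     namespace = namespace.strip('-')
--
--     # Add prefix to avoid conflicts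
--     namespace = f"team-{namespace}"
--
--     # Kubernetes namespace names must be <= 63 characters
--     if len(namespace) > 63:
--         namespace = namespace[:63].rstrip('-')
--
--     return namespace
-- ===== SOURCE B (Python) =====
-- def sanitize_namespace_name(team_name: str) -> str:
--     """Convert team name to valid Kubernetes namespace name (single stateful scan)."""
--     out = []
--     pending = False
--     for c in team_name.lower():
--         if c.isalnum():
--             if pending and out:
--                 out.append('-')
--             out.append(c)
--             pending = False
--         else:
--             pending = True
--     namespace = "team-" + ''.join(out)
--     if len(namespace) > 63:
--         namespace = namespace[:63].rstrip('-')
--     return namespace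
-- ===== Notes on version B (the rewrite author's own statement) =====
-- stated objective: alternative
-- what changed: A sanitizes by mapping non-alphanumerics to hyphens and then collapsing and stripping them with a split/filter/join/strip pipeline over intermediate strings; B builds the sanitized core in one stateful left-to-right scan (pending-hyphen flag), emitting a separator only between alphanumeric runs, so no intermediate list of fragments is ever built.
import Mathlib
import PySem

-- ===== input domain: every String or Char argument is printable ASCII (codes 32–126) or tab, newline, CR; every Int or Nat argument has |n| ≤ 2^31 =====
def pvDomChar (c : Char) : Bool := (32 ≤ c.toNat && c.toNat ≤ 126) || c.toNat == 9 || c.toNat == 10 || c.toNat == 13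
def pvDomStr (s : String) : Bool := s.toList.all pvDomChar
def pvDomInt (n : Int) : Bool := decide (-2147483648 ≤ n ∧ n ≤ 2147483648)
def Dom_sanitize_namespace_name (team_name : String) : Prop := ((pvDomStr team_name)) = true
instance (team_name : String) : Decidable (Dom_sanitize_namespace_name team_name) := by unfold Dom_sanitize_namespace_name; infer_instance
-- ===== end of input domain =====

-- B is an alternative implementation: one stateful scan with a pending-hyphen flag instead of
-- A's map/split/filter/join/strip pipeline over intermediate strings.

-- shared helper: exact port of Python's s.rstrip('-') (both A and B call .rstrip('-') on the truncated string)
def pyRstripHyphen (l : List Char) : List Char :=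
  (l.reverse.dropWhile (fun c => c == '-')).reverse

-- ===== PORT A =====
def sanitize_namespace_name (team_name : String) : String :=
  let ns1 := PySem.Chars.lower team_name.toList
  let ns2 := ns1.map (fun c => if PySem.Chars.isalnum c then c else '-')
  let ns3 := PySem.Chars.join ['-'] ((PySem.Chars.splitOn ns2 ['-']).filter (fun p => !p.isEmpty))
  let ns4 := PySem.Chars.stripChars ns3 ['-']
  let ns5 := "team-".toList ++ ns4
  let ns6 := if 63 < ns5.length then pyRstripHyphen (PySem.List.slice ns5 none (some 63)) else ns5
  String.mk ns6

-- ===== PORT B =====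
-- the loop body of Source B: append alnum chars, emit one '-' between runs (pending flag)
def altStep (st : List Char × Bool) (c : Char) : List Char × Bool :=
  if PySem.Chars.isalnum c then
    ((if st.2 && !st.1.isEmpty then st.1 ++ ['-'] else st.1) ++ [c], false)
  else
    (st.1, true)

def sanitize_namespace_name_alt (team_name : String) : String :=
  let core := ((PySem.Chars.lower team_name.toList).foldl altStep ([], false)).1
  let ns := "team-".toList ++ core
  let ns2 := if 63 < ns.length then pyRstripHyphen (PySem.List.slice ns none (some 63)) else ns
  String.mk ns2

-- ===== PRECONDITION & SPEC =====
def Spec_sanitize_namespace_name (team_name : String) (out : String) : Prop := out = sanitize_namespace_name_alt team_name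
instance (team_name : String) (out : String) : Decidable (Spec_sanitize_namespace_name team_name out) := by unfold Spec_sanitize_namespace_name; infer_instance

-- ===== CLAIM (what is proved, stated in full; the proofs are below) =====
def Claim_equal_sanitize_namespace_name : Prop := ∀ (team_name : String), Dom_sanitize_namespace_name team_name → Spec_sanitize_namespace_name team_name (sanitize_namespace_name team_name)

-- ===== LEMMAS AND PROOFS =====

-- structural reference for splitOn on the one-char separator '-'
def mySplit (pre : List Char) : List Char → List (List Char)
  | [] => [pre]
  | c :: rest => if c = '-' then pre :: mySplit [] rest else mySplit (pre ++ [c]) rest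

lemma go_eq (l : List Char) : ∀ (fuel : Nat) (cur : List Char) (acc : List (List Char)),
    l.length ≤ fuel →
    PySem.Chars.splitOn.go ['-'] fuel l cur acc = acc.reverse ++ mySplit cur.reverse l := by
  induction l with
  | nil =>
      intro fuel cur acc _
      cases fuel <;> simp [PySem.Chars.splitOn.go, mySplit]
  | cons c rest ih =>
      intro fuel cur acc h
      cases fuel with
      | zero => simp at h
      | succ f =>
          by_cases hc : c = '-'
          · subst hc
            rw [PySem.Chars.splitOn.go]
            simp only [List.isPrefixOf, BEq.rfl, Bool.true_and, if_pos]
            rw [show List.drop ['-'].length ('-' :: rest) = rest from rfl]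
            rw [ih f [] (cur.reverse :: acc) (by simpa using h)]
            simp [mySplit]
          · rw [PySem.Chars.splitOn.go]
            have : (['-'].isPrefixOf (c :: rest)) = false := by
              simp [List.isPrefixOf]; exact fun h' => (hc h'.symm).elim
            rw [this]
            simp only [Bool.false_eq_true, if_false]
            rw [ih f (c :: cur) acc (by simpa using Nat.le_of_succ_le_succ h)]
            simp [mySplit, hc]

lemma splitOn_eq (m : List Char) : PySem.Chars.splitOn m ['-'] = mySplit [] m := by
  simpa using go_eq m (m.length + 1) [] [] (by omega)

def words (m : List Char) : List (List Char) := (mySplit [] m).filter (fun p => !p.isEmpty)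

def body (m : List Char) : List Char := List.intercalate ['-'] (words m)

lemma inter_cons (s x : List Char) (xs : List (List Char)) :
    List.intercalate s (x :: xs) = x ++ (if xs = [] then [] else s ++ List.intercalate s xs) := by
  cases xs with
  | nil => simp [List.intercalate]
  | cons y ys => simp [List.intercalate, List.intersperse]

lemma mySplit_pre (m : List Char) : ∀ pre,
    mySplit pre m = (pre ++ (mySplit [] m).headI) :: (mySplit [] m).tail := by
  induction m with
  | nil => intro pre; simp [mySplit]
  | cons c rest ih =>
      intro pre
      by_cases hc : c = '-'
      · subst hc; simp [mySplit]
      · simp only [mySplit, if_neg hc, List.nil_append]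
        rw [ih (pre ++ [c]), ih [c]]
        simp

lemma body_nil : body [] = [] := by simp [body, words, mySplit, List.intercalate]

lemma body_hyphen (m : List Char) : body ('-' :: m) = body m := by
  simp [body, words, mySplit]

lemma inter_filter_ne_nil (L : List (List Char))
    (h : L.filter (fun p => !p.isEmpty) ≠ []) :
    List.intercalate ['-'] (L.filter (fun p => !p.isEmpty)) ≠ [] := by
  cases hG : L.filter (fun p => !p.isEmpty) with
  | nil => exact (h hG).elim
  | cons x xs =>
      rw [inter_cons]
      intro hcontra
      rcases List.append_eq_nil_iff.mp hcontra with ⟨h1, _⟩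
      have hx : x ≠ [] := by
        have := List.of_mem_filter (p := fun p : List Char => !p.isEmpty)
          (hG ▸ List.mem_cons_self ..)
        simpa using this
      exact hx h1

lemma body_cons {c : Char} (hc : c ≠ '-') (m : List Char) :
    body (c :: m) = c :: (if body m = [] then [] else
      (if m.head? = some '-' then ['-'] else []) ++ body m) := by
  cases m with
  | nil => simp [body, words, mySplit, hc, List.intercalate]
  | cons d rest =>
      by_cases hd : d = '-'
      · subst hd
        have h1 : mySplit [] ('-' :: rest) = [] :: mySplit [] rest := by simp [mySplit]
        have h2 : mySplit [] (c :: '-' :: rest) = [c] :: mySplit [] rest := by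
          simp [mySplit, hc]
        have hb : body ('-' :: rest)
            = List.intercalate ['-'] ((mySplit [] rest).filter (fun p => !p.isEmpty)) := by
          simp [body, words, h1]
        rw [body, words, h2, List.filter_cons]
        simp only [List.isEmpty_cons, Bool.not_false, if_pos]
        rw [inter_cons]
        by_cases hF : (mySplit [] rest).filter (fun p => !p.isEmpty) = []
        · simp [hF, hb, List.intercalate]
        · have hbne : ¬ List.intercalate ['-']
              ((mySplit [] rest).filter (fun p => !p.isEmpty)) = [] :=
            inter_filter_ne_nil _ hF
          simp [hF, hb, hbne]
      · have h1 : mySplit [] (d :: rest)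
            = (d :: (mySplit [] rest).headI) :: (mySplit [] rest).tail := by
          rw [show mySplit [] (d :: rest) = mySplit [d] rest by simp [mySplit, hd],
            mySplit_pre rest [d]]
          simp
        have h2 : mySplit [] (c :: d :: rest)
            = (c :: d :: (mySplit [] rest).headI) :: (mySplit [] rest).tail := by
          rw [show mySplit [] (c :: d :: rest) = mySplit [c, d] rest by
              simp [mySplit, hc, hd],
            mySplit_pre rest [c, d]]
          simp
        have hT : body (d :: rest)
            = (d :: (mySplit [] rest).headI) ++
              (if (mySplit [] rest).tail.filter (fun p => !p.isEmpty) = [] then []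
               else ['-'] ++
                 List.intercalate ['-'] ((mySplit [] rest).tail.filter (fun p => !p.isEmpty))) := by
          rw [body, words, h1, List.filter_cons]
          simp only [List.isEmpty_cons, Bool.not_false, if_pos]
          rw [inter_cons]
        have hbne : body (d :: rest) ≠ [] := by rw [hT]; simp
        have hTc : body (c :: d :: rest) = c :: body (d :: rest) := by
          rw [body, words, h2, List.filter_cons]
          simp only [List.isEmpty_cons, Bool.not_false, if_pos]
          rw [inter_cons, hT]
          simp
        rw [hTc, if_neg hbne]
        simp only [List.head?_cons, Option.some.injEq]
        rw [if_neg (fun h => hd h)]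
        simp

-- the step function of B's loop, on the '-'-marked alphabet
def mStep (st : List Char × Bool) (c : Char) : List Char × Bool :=
  if c = '-' then (st.1, true)
  else ((if st.2 && !st.1.isEmpty then st.1 ++ ['-'] else st.1) ++ [c], false)

lemma isalnum_ne_hyphen {c : Char} (h : PySem.Chars.isalnum c = true) : c ≠ '-' := by
  intro hc; subst hc; exact absurd h (by decide)

lemma fold_alt_eq_fold_m (l : List Char) : ∀ st,
    l.foldl altStep st
      = (l.map (fun c => if PySem.Chars.isalnum c then c else '-')).foldl mStep st := by
  induction l with
  | nil => intro st; rfl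
  | cons c rest ih =>
      intro st
      simp only [List.foldl_cons, List.map_cons]
      by_cases h : PySem.Chars.isalnum c = true
      · rw [ih]
        congr 1
        simp [altStep, mStep, h, isalnum_ne_hyphen h]
      · rw [ih]
        congr 1
        simp [altStep, mStep, h]

lemma fold_m_inv (m : List Char) : ∀ (out : List Char) (pending : Bool),
    (m.foldl mStep (out, pending)).1 =
      out ++ (if body m = [] then [] else
        (if out ≠ [] ∧ (pending = true ∨ m.head? = some '-') then ['-'] else []) ++ body m) := by
  induction m with
  | nil => intro out pending; simp [body_nil]
  | cons c rest ih =>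
      intro out pending
      by_cases hc : c = '-'
      · subst hc
        simp only [List.foldl_cons, mStep, if_true]
        rw [ih out true, body_hyphen]
        simp
      · simp only [List.foldl_cons, mStep, if_neg hc]
        rw [ih _ false]
        have hsep : (if (pending && !out.isEmpty) = true then out ++ ['-'] else out)
            = out ++ (if out ≠ [] ∧ (pending = true ∨ (c :: rest).head? = some '-')
                then ['-'] else []) := by
          cases pending with
          | false => simp [hc]
          | true =>
              by_cases ho : out = []
              · simp [ho]
              · have h1 : (true && !out.isEmpty) = true := by simp [ho]
                rw [if_pos h1, if_pos ⟨ho, Or.inl rfl⟩]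
        rw [hsep, body_cons hc]
        by_cases hb : body rest = []
        · simp [hb]
        · simp [hb, List.append_assoc]

-- core equality: B's scan equals A's split/filter/join pipeline (pre-strip)
lemma core_eq_body (l : List Char) :
    (l.foldl altStep ([], false)).1
      = body (l.map (fun c => if PySem.Chars.isalnum c then c else '-')) := by
  rw [fold_alt_eq_fold_m, fold_m_inv]
  simp

lemma body_head (m : List Char) : (body m).head? ≠ some '-' := by
  induction m with
  | nil => simp [body_nil]
  | cons c rest ih =>
      by_cases hc : c = '-'
      · subst hc; rw [body_hyphen]; exact ih
      · rw [body_cons hc]; simp; exact fun h => hc h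

lemma body_last (m : List Char) : (body m).getLast? ≠ some '-' := by
  induction m with
  | nil => simp [body_nil]
  | cons c rest ih =>
      by_cases hc : c = '-'
      · subst hc; rw [body_hyphen]; exact ih
      · rw [body_cons hc]
        by_cases hb : body rest = []
        · simp [hb]; exact fun h => hc h
        · simp only [if_neg hb]
          rw [show (c :: ((if rest.head? = some '-' then ['-'] else []) ++ body rest))
              = (c :: (if rest.head? = some '-' then ['-'] else [])) ++ body rest by simp]
          rw [List.getLast?_append_of_ne_nil _ hb]
          exact ih

lemma dropWhile_hyphen_eq_self (l : List Char) (h : l.head? ≠ some '-') :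
    l.dropWhile (fun c => ['-'].contains c) = l := by
  cases l with
  | nil => simp
  | cons a t =>
      have ha : a ≠ '-' := fun hh => h (by simp [hh])
      simp [ha]

lemma stripChars_body (m : List Char) : PySem.Chars.stripChars (body m) ['-'] = body m := by
  show (List.dropWhile (fun c => ['-'].contains c)
      (List.dropWhile (fun c => ['-'].contains c) (body m)).reverse).reverse = body m
  rw [dropWhile_hyphen_eq_self _ (body_head m)]
  rw [dropWhile_hyphen_eq_self _ (by rw [List.head?_reverse]; exact body_last m)]
  simp

-- ===== VERDICT (by name: the statement is the Claim_ definition above) =====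
theorem sanitize_namespace_name_spec : Claim_equal_sanitize_namespace_name := by
  intro team_name _
  unfold Spec_sanitize_namespace_name
  unfold sanitize_namespace_name sanitize_namespace_name_alt
  have hc : PySem.Chars.stripChars
      (PySem.Chars.join ['-'] ((PySem.Chars.splitOn
        ((PySem.Chars.lower team_name.toList).map (fun c => if PySem.Chars.isalnum c then c else '-')) ['-']).filter
        (fun p => !p.isEmpty))) ['-']
      = ((PySem.Chars.lower team_name.toList).foldl altStep ([], false)).1 := by
    rw [core_eq_body]
    rw [PySem.Chars.join, splitOn_eq]
    exact stripChars_body _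
  simp only [hc]
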